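-- pv_equiv track=rewrite | github.com/Mambacita0224/RAYW3_FYP | my-music-generator/api/music_api.py | count_consecutive_lengths
-- ===== SOURCE A (Python) =====
-- def count_consecutive_lengths(lengths):
--     count = 0
--     for i in range(0, len(lengths), 4):
--         if (i + 2 < len(lengths) and
--             lengths[i] == lengths[i + 1] == lengths[i + 2]) or \
--            (i + 3 < len(lengths) and
--             lengths[i + 1] == lengths[i + 2] == lengths[i + 3]):
--             count += 1
--
--     return count
-- ===== SOURCE B (Python) =====
-- def count_consecutive_lengths(lengths):
--     # Single element-wise pass: accumulate items into a 4-slot buffer; each full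
--     # buffer is one block, judged by direct comparisons on its unpacked members.
--     count = 0
--     buf = []
--     for x in lengths:
--         buf.append(x)
--         if len(buf) == 4:
--             a, b, c, d = buf
--             if a == b == c or b == c == d:
--                 count += 1
--             buf = []
--     if len(buf) == 3:
--         a, b, c = buf
--         if a == b == c:
--             count += 1
--     return count
-- ===== Notes on version B (the rewrite author's own statement) =====
-- stated objective: alternative
-- what changed: A's index loop with stride-4 range() and guarded random-access triple comparisons is replaced by a single element-wise pass that accumulates items into a 4-slot buffer, judges each full buffer (and a trailing 3-element buffer) by direct comparisons on its unpacked members, with no indexing into the input at all.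
import Mathlib
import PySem

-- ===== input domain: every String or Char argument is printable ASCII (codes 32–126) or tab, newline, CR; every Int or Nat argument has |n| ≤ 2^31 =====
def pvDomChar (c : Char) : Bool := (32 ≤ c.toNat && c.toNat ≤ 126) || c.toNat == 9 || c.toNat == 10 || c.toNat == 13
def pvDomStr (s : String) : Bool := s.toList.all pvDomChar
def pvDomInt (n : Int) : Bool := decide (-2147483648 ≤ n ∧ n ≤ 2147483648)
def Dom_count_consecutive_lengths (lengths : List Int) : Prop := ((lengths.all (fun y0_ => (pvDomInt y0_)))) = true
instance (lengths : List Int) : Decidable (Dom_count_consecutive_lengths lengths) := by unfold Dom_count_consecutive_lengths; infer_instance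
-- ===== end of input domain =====

-- B replaces A's stride-4 index loop with guarded random accesses by a single element-wise
-- pass accumulating items into a 4-slot buffer, each full (or trailing 3-element) buffer
-- judged by direct comparisons on its members — no indexing (objective: alternative).

-- ===== PORT A =====
def count_consecutive_lengths (lengths : List Int) : Int :=
  List.foldl
    (fun count i =>
      if ((decide (i + 2 < (lengths.length : Int)) &&
            (PySem.List.pyGet? lengths i == PySem.List.pyGet? lengths (i + 1)) &&
            (PySem.List.pyGet? lengths (i + 1) == PySem.List.pyGet? lengths (i + 2))) ||
          (decide (i + 3 < (lengths.length : Int)) &&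
            (PySem.List.pyGet? lengths (i + 1) == PySem.List.pyGet? lengths (i + 2)) &&
            (PySem.List.pyGet? lengths (i + 2) == PySem.List.pyGet? lengths (i + 3))))
      then count + 1 else count)
    0 (PySem.List.pyRange 0 (lengths.length : Int) 4)

-- ===== PORT B =====
-- the loop body: buf.append(x); when the buffer holds 4 items, unpack and judge the block
def pvStep (st : Int × List Int) (x : Int) : Int × List Int :=
  let buf := st.2 ++ [x]
  if buf.length = 4 then
    match buf with
    | [a, b, c, d] =>
        (st.1 + (if (a == b && b == c) || (b == c && c == d) then (1 : Int) else 0), [])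
    | _ => (st.1, [])   -- unreachable: buf has length 4
  else
    (st.1, buf)

def count_consecutive_lengths_alt (lengths : List Int) : Int :=
  let st := lengths.foldl pvStep ((0 : Int), ([] : List Int))
  -- if len(buf) == 3: unpack and judge the trailing triple
  match st.2 with
  | [a, b, c] => st.1 + (if a == b && b == c then 1 else 0)
  | _ => st.1

-- ===== PRECONDITION & SPEC =====
def Spec_count_consecutive_lengths (lengths : List Int) (out : Int) : Prop := out = count_consecutive_lengths_alt lengths
instance (lengths : List Int) (out : Int) : Decidable (Spec_count_consecutive_lengths lengths out) := by unfold Spec_count_consecutive_lengths; infer_instance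

-- ===== CLAIM (what is proved, stated in full; the proofs are below) =====
def Claim_equal_count_consecutive_lengths : Prop := ∀ (lengths : List Int), Dom_count_consecutive_lengths lengths → Spec_count_consecutive_lengths lengths (count_consecutive_lengths lengths)

-- ===== LEMMAS AND PROOFS =====

-- reference chunk recursion both ports are reduced to
def pvChunks : List Int → Int
  | [] => 0
  | [_] => 0
  | [_, _] => 0
  | [a, b, c] => if a == b && b == c then (1 : Int) else 0
  | a :: b :: c :: d :: rest =>
      (if (a == b && b == c) || (b == c && c == d) then (1 : Int) else 0) + pvChunks rest

-- induction in steps of four, matching the block structure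
lemma pv_ind (P : List Int → Prop) (h0 : P []) (h1 : ∀ a, P [a]) (h2 : ∀ a b, P [a, b])
    (h3 : ∀ a b c, P [a, b, c])
    (h4 : ∀ a b c d rest, P rest → P (a :: b :: c :: d :: rest)) : ∀ l, P l := by
  have key : ∀ n (l : List Int), l.length ≤ n → P l := by
    intro n
    induction n with
    | zero =>
        intro l h
        match l with
        | [] => exact h0
        | x :: xs => simp at h
    | succ n ih =>
        intro l h
        match l with
        | [] => exact h0
        | [a] => exact h1 a
        | [a, b] => exact h2 a b
        | [a, b, c] => exact h3 a b c
        | a :: b :: c :: d :: rest =>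
            refine h4 a b c d rest (ih rest ?_)
            simp at h ⊢
            omega
  intro l
  exact key l.length l le_rfl

-- A's if-condition at index i, as a predicate
def pvA (l : List Int) (i : Int) : Bool :=
  ((decide (i + 2 < (l.length : Int)) &&
      (PySem.List.pyGet? l i == PySem.List.pyGet? l (i + 1)) &&
      (PySem.List.pyGet? l (i + 1) == PySem.List.pyGet? l (i + 2))) ||
    (decide (i + 3 < (l.length : Int)) &&
      (PySem.List.pyGet? l (i + 1) == PySem.List.pyGet? l (i + 2)) &&
      (PySem.List.pyGet? l (i + 2) == PySem.List.pyGet? l (i + 3))))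

lemma pvA_foldl (l : List Int) (t : List Int) (init : Int) :
    List.foldl (fun count i => if pvA l i then count + 1 else count) init t =
      init + (t.map (fun i => if pvA l i then (1 : Int) else 0)).sum := by
  rw [← PySem.List.foldl_add t (fun i => if pvA l i then (1 : Int) else 0) init]
  apply PySem.List.foldl_congr_mem
  intro acc i _
  by_cases h : pvA l i <;> simp [h]

-- the number of stride-4 indices below m
def pvQ (m : Int) : Nat := if 0 < m then ((m + 4 - 1) / 4).toNat else 0

lemma pvRange4 (m : Int) :
    PySem.List.pyRange 0 m 4 = (List.range (pvQ m)).map (fun k : Nat => 4 * (k : Int)) := by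
  rw [PySem.List.pyRange_of_pos 0 m (by norm_num)]
  unfold pvQ
  simp

lemma pvQ_succ (n : Nat) : pvQ ((n : Int) + 4) = pvQ (n : Int) + 1 := by
  unfold pvQ
  split_ifs <;> omega

lemma pvA_shift (x : Int) (xs : List Int) (k : Nat) :
    pvA (x :: xs) ((k : Int) + 1) = pvA xs (k : Int) := by
  unfold pvA
  have h1 : ((k : Int) + 1) + 1 = ((k + 1 : Nat) : Int) + 1 := by push_cast; ring
  have h2 : ((k : Int) + 1) + 2 = ((k + 2 : Nat) : Int) + 1 := by push_cast; ring
  have h3 : ((k : Int) + 1) + 3 = ((k + 3 : Nat) : Int) + 1 := by push_cast; ring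
  rw [h1, h2, h3, PySem.List.pyGet?_cons_succ, PySem.List.pyGet?_cons_succ,
      PySem.List.pyGet?_cons_succ, PySem.List.pyGet?_cons_succ]
  have e1 : ((k + 1 : Nat) : Int) = (k : Int) + 1 := by push_cast; ring
  have e2 : ((k + 2 : Nat) : Int) = (k : Int) + 2 := by push_cast; ring
  have e3 : ((k + 3 : Nat) : Int) = (k : Int) + 3 := by push_cast; ring
  rw [e1, e2, e3]
  have g1 : ((k : Int) + 2 + 1 < ((x :: xs).length : Int)) ↔
      ((k : Int) + 2 < (xs.length : Int)) := by simp
  have g2 : ((k : Int) + 3 + 1 < ((x :: xs).length : Int)) ↔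
      ((k : Int) + 3 < (xs.length : Int)) := by simp
  simp only [g1, g2]

lemma pvA_shift4 (a b c d : Int) (xs : List Int) (k : Nat) :
    pvA (a :: b :: c :: d :: xs) (4 * ((k : Int) + 1)) = pvA xs (4 * (k : Int)) := by
  have e : 4 * ((k : Int) + 1) = (((4 * k + 3 : Nat) : Int)) + 1 := by push_cast; ring
  rw [e, pvA_shift]
  have e2 : ((4 * k + 3 : Nat) : Int) = ((4 * k + 2 : Nat) : Int) + 1 := by push_cast; ring
  rw [e2, pvA_shift]
  have e3 : ((4 * k + 2 : Nat) : Int) = ((4 * k + 1 : Nat) : Int) + 1 := by push_cast; ring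
  rw [e3, pvA_shift]
  have e4 : ((4 * k + 1 : Nat) : Int) = ((4 * k : Nat) : Int) + 1 := by push_cast; ring
  rw [e4, pvA_shift]
  congr 1

lemma pvA_sum (l : List Int) :
    count_consecutive_lengths l =
      ((List.range (pvQ (l.length : Int))).map
        (fun k : Nat => if pvA l (4 * (k : Int)) then (1 : Int) else 0)).sum := by
  have h : count_consecutive_lengths l =
      List.foldl (fun count i => if pvA l i then count + 1 else count) 0
        (PySem.List.pyRange 0 (l.length : Int) 4) := rfl
  rw [h, pvA_foldl, pvRange4, List.map_map]
  simp only [Function.comp_def, zero_add]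

lemma pvA_head (a b c d : Int) (rest : List Int) :
    pvA (a :: b :: c :: d :: rest) 0 = ((a == b && b == c) || (b == c && c == d)) := by
  unfold pvA
  simp only [pysem]
  rw [decide_eq_true (by simp; omega), decide_eq_true (by simp; omega)]
  simp [pysem]

lemma pvA_eq_chunks (l : List Int) : count_consecutive_lengths l = pvChunks l := by
  refine pv_ind (fun l => count_consecutive_lengths l = pvChunks l) ?_ ?_ ?_ ?_ ?_ l
  · show count_consecutive_lengths [] = pvChunks []
    decide
  · intro a
    show count_consecutive_lengths [a] = pvChunks [a]
    rw [pvA_sum]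
    norm_num [pvQ, List.range_succ]
    simp [pvA, pvChunks, pysem]
  · intro a b
    show count_consecutive_lengths [a, b] = pvChunks [a, b]
    rw [pvA_sum]
    norm_num [pvQ, List.range_succ]
    simp [pvA, pvChunks, pysem]
  · intro a b c
    show count_consecutive_lengths [a, b, c] = pvChunks [a, b, c]
    rw [pvA_sum]
    norm_num [pvQ, List.range_succ]
    simp [pvA, pvChunks, pysem]
  · intro a b c d rest ih
    rw [pvA_sum, pvChunks, ← ih, pvA_sum]
    have hm : (((a :: b :: c :: d :: rest).length : Int)) = (rest.length : Int) + 4 := by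
      simp
      ring
    rw [hm, pvQ_succ, List.range_succ_eq_map, List.map_cons, List.map_map, List.sum_cons]
    congr 1
    · simp only [Nat.cast_zero, mul_zero, pvA_head]
    · refine congrArg List.sum (List.map_congr_left ?_)
      intro k _
      simp only [Function.comp]
      rw [show ((((Nat.succ k) : Nat) : Int)) = (k : Int) + 1 by push_cast; ring,
          show (4 : Int) * ((k : Int) + 1) = 4 * ((k : Int) + 1) from rfl, pvA_shift4]

lemma pvB_loop (l : List Int) : ∀ cnt : Int,
    (match (List.foldl pvStep (cnt, ([] : List Int)) l).2 with
      | [a, b, c] =>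
          (List.foldl pvStep (cnt, ([] : List Int)) l).1 +
            (if a == b && b == c then (1 : Int) else 0)
      | _ => (List.foldl pvStep (cnt, ([] : List Int)) l).1) = cnt + pvChunks l := by
  refine pv_ind (fun l => ∀ cnt : Int,
    (match (List.foldl pvStep (cnt, ([] : List Int)) l).2 with
      | [a, b, c] =>
          (List.foldl pvStep (cnt, ([] : List Int)) l).1 +
            (if a == b && b == c then (1 : Int) else 0)
      | _ => (List.foldl pvStep (cnt, ([] : List Int)) l).1) = cnt + pvChunks l) ?_ ?_ ?_ ?_ ?_ l
  · intro cnt; simp [pvChunks]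
  · intro a cnt; simp [pvStep, pvChunks]
  · intro a b cnt; simp [pvStep, pvChunks]
  · intro a b c cnt; simp [pvStep, pvChunks]
  · intro a b c d rest ih cnt
    have hstep : List.foldl pvStep (cnt, ([] : List Int)) (a :: b :: c :: d :: rest) =
        List.foldl pvStep
          (cnt + (if (a == b && b == c) || (b == c && c == d) then (1 : Int) else 0),
            ([] : List Int)) rest := rfl
    rw [hstep, ih, pvChunks]
    ring

lemma pvB_eq_chunks (l : List Int) : count_consecutive_lengths_alt l = pvChunks l := by
  have h := pvB_loop l 0
  unfold count_consecutive_lengths_alt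
  simpa using h

-- ===== VERDICT (by name: the statement is the Claim_ definition above) =====
theorem count_consecutive_lengths_spec : Claim_equal_count_consecutive_lengths := by
  intro l _
  unfold Spec_count_consecutive_lengths
  rw [pvA_eq_chunks, pvB_eq_chunks]
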